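-- pv_equiv track=rewrite | github.com/didjrc/Hog | hog/sketches/sketch_rollcheck.py | roll_dice
-- ===== SOURCE A (Python) =====
-- def roll_dice(n, dice):
--
--     # These assert statements ensure that num_rolls is a positive integer.
--     assert type(n) == int, 'num_rolls must be an integer.'
--     assert n > 0, 'Must roll at least once.'
--     # BEGIN Question 1
--     curr_roll = 0
--     dice_total = []
--
--     while curr_roll < n:
--         """Condition: Pig Out"""
--         #Checks to see whether or not an element i in dice_total is == 1.
--         dice_total.append(dice[curr_roll])
--         curr_roll = curr_roll + 1
--     for i in dice_total:
--         if i == 1: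
--             return sum(dice_total)*0
--     return sum(dice_total)
-- ===== SOURCE B (Python) =====
-- def roll_dice(n, dice):
--     assert type(n) == int, 'num_rolls must be an integer.'
--     assert n > 0, 'Must roll at least once.'
--     total = 0
--     pig_out = False
--     for curr in range(n):
--         roll = dice[curr]
--         total = total + roll
--         if roll == 1:
--             pig_out = True
--     return total * 0 if pig_out else total
-- ===== Notes on version B (the rewrite author's own statement) =====
-- stated objective: simpler
-- what changed: Replaces A's three passes (build a copy of the rolls, scan it for a 1, sum it) with one accumulating loop keeping a running total and a pig-out flag, avoiding the intermediate list.
import Mathlib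
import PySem

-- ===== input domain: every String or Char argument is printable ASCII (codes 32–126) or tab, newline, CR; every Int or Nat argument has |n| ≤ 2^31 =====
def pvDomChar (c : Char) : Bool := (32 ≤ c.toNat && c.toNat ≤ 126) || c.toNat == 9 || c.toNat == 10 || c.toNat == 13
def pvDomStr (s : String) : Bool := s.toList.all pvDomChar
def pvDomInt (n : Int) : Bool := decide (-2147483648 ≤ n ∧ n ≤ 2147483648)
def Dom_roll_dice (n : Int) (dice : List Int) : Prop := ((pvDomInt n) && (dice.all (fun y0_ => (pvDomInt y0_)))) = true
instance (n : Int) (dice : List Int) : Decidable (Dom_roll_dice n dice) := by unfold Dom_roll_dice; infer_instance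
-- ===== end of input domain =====

-- B replaces A's three passes (build the roll list, scan it for a 1, sum it) with one accumulating loop (running total + pig-out flag).


-- ===== PORT A =====
-- while loop: appends dice[curr] for curr = 0 .. n-1; pyGetD is exact under Pre_ (index in range; Python's IndexError is excluded by Pre_)
def rollA_collect (n : Int) (dice : List Int) (curr : Int) (acc : List Int) : List Int :=
  if _h : curr < n then
    rollA_collect n dice (curr + 1) (acc ++ [PySem.List.pyGetD dice curr 0])
  else acc
termination_by (n - curr).toNat
decreasing_by omega

-- 'for i in dice_total: if i == 1: return sum*0' as a structural scan
def rollA_scan (dice_total full : List Int) : Int :=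
  match dice_total with
  | [] => full.sum
  | i :: rest => if i == 1 then full.sum * 0 else rollA_scan rest full

def roll_dice (n : Int) (dice : List Int) : Int :=
  let dice_total := rollA_collect n dice 0 []
  rollA_scan dice_total dice_total

-- ===== PORT B =====
-- single pass over range(n): state (total, pig_out)
def roll_dice_alt (n : Int) (dice : List Int) : Int :=
  let s := (PySem.List.pyRange 0 n 1).foldl
    (fun (acc : Int × Bool) curr =>
      let roll := PySem.List.pyGetD dice curr 0
      (acc.1 + roll, if roll == 1 then true else acc.2)) (0, false)
  if s.2 then s.1 * 0 else s.1

-- ===== PRECONDITION & SPEC =====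
-- A asserts n > 0 and raises IndexError when n > len(dice); Pre_ excludes exactly those.
def Pre_roll_dice (n : Int) (dice : List Int) : Prop := 0 < n ∧ n ≤ dice.length
instance (n : Int) (dice : List Int) : Decidable (Pre_roll_dice n dice) := by unfold Pre_roll_dice; infer_instance
def pvWitness_roll_dice : Int × List Int := (3, [4, 1, 6])

def Spec_roll_dice (n : Int) (dice : List Int) (out : Int) : Prop := out = roll_dice_alt n dice
instance (n : Int) (dice : List Int) (out : Int) : Decidable (Spec_roll_dice n dice out) := by unfold Spec_roll_dice; infer_instance

-- ===== CLAIM (what is proved, stated in full; the proofs are below) =====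
def Claim_equal_roll_dice : Prop := ∀ (n : Int) (dice : List Int), Dom_roll_dice n dice → Pre_roll_dice n dice → Spec_roll_dice n dice (roll_dice n dice)

-- ===== LEMMAS AND PROOFS =====

-- A's while loop builds exactly the map of dice lookups over the remaining range.
theorem rollA_collect_eq (n : Int) (dice : List Int) :
    ∀ (curr : Int) (acc : List Int),
      rollA_collect n dice curr acc
        = acc ++ (PySem.List.pyRange curr n 1).map (fun i => PySem.List.pyGetD dice i 0) := by
  intro curr acc
  by_cases h : curr < n
  · rw [rollA_collect, dif_pos h, rollA_collect_eq n dice (curr + 1),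
        PySem.List.pyRange_one_cons h]
    simp
  · rw [rollA_collect, dif_neg h, PySem.List.pyRange_one_eq_nil (by omega)]
    simp
termination_by curr _ => (n - curr).toNat
decreasing_by omega

-- A's scan over the full list: sum*0 if some element is 1, else the sum.
theorem rollA_scan_eq (full : List Int) :
    ∀ (l : List Int),
      rollA_scan l full = if l.any (· == 1) then full.sum * 0 else full.sum := by
  intro l
  induction l with
  | nil => simp [rollA_scan]
  | cons i rest ih =>
      by_cases h : i = 1
      · simp [rollA_scan, h]
      · simp [rollA_scan, h, ih]

-- B's fold computes the sum and the any-flag of the mapped list in one pass.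
theorem foldB_eq (dice : List Int) (L : List Int) :
    ∀ (t : Int) (p : Bool),
      L.foldl (fun (acc : Int × Bool) curr =>
        let roll := PySem.List.pyGetD dice curr 0
        (acc.1 + roll, if roll == 1 then true else acc.2)) (t, p)
      = (t + (L.map (fun i => PySem.List.pyGetD dice i 0)).sum,
         p || (L.map (fun i => PySem.List.pyGetD dice i 0)).any (· == 1)) := by
  intro t p
  induction L generalizing t p with
  | nil => simp
  | cons x rest ih =>
      simp only [List.foldl_cons, List.map_cons, List.sum_cons, List.any_cons, ih]
      by_cases h : PySem.List.pyGetD dice x 0 = 1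
      · simp [h, add_assoc]
      · have hb : (PySem.List.pyGetD dice x 0 == 1) = false := beq_eq_false_iff_ne.mpr h
        simp [hb, add_assoc]

-- ===== VERDICT (by name: the statement is the Claim_ definition above) =====
theorem roll_dice_spec : Claim_equal_roll_dice := by
  intro n dice _ _
  unfold Spec_roll_dice roll_dice roll_dice_alt
  rw [rollA_collect_eq, foldB_eq]
  simp only [List.nil_append, Bool.false_or]
  rw [rollA_scan_eq]
  by_cases h : ((PySem.List.pyRange 0 n 1).map (fun i => PySem.List.pyGetD dice i 0)).any (· == 1) <;> simp [h]
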